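-- pv_equiv track=rewrite | github.com/hahahakknd/CodingTest | baekjoon/2775_Success/womens_president.py | resident_map
-- ===== SOURCE A (Python) =====
-- def resident_map(max_k: int, max_n: int) -> list:
--     # 1층에 대한 초기화
--     floor_map: list = []
--     floor: list = []
--     for num in range(1, max_n+1):
--         floor.append(num*(num+1)//2)
--     floor_map.append(floor.copy())
--
--     if max_k == 1:
--         return floor_map
--
--     for floor_number in range(1, max_k):
--         floor.clear()
--         for room_number in range(0, max_n):
--             sum_down_resident: int = 0
--             for down_floor_room_number in range(0, room_number+1):
--                 sum_down_resident += floor_map[floor_number-1][down_floor_room_number]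
--             floor.append(sum_down_resident)
--         floor_map.append(floor.copy())
--
--     return floor_map
-- ===== SOURCE B (Python) =====
-- def resident_map(max_k: int, max_n: int) -> list:
--     # Running prefix sums: floor 1 is the running sum of 1..max_n, and each
--     # higher floor is the running prefix sum of the floor below. O(K*N).
--     row: list = []
--     s = 0
--     for num in range(1, max_n + 1):
--         s += num
--         row.append(s)
--     floor_map: list = [row]
--     for _ in range(1, max_k):
--         s = 0
--         new_row: list = []
--         for x in row:
--             s += x
--             new_row.append(s)
--         row = new_row
--         floor_map.append(row)
--     return floor_map
-- ===== Notes on version B (the rewrite author's own statement) =====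
-- stated objective: faster
-- what changed: Each floor is computed as a single running prefix sum of the floor below (and floor 1 as a running sum of 1..n), replacing A's re-summation of rooms 0..i for every room i.
import Mathlib
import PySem

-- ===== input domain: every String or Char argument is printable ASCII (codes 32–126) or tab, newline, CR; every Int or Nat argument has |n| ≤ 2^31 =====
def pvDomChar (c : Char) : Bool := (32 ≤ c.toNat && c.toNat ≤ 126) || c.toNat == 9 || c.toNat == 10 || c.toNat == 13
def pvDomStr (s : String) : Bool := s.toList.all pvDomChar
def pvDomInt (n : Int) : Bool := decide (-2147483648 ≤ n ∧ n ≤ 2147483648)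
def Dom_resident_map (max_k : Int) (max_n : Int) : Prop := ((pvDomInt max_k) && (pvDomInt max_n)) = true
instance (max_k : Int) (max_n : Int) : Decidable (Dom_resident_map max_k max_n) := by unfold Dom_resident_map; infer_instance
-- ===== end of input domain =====

-- B replaces A's per-room re-summation of the floor below by one running prefix sum per floor (faster).

-- ===== PORT A =====
-- Literal port of A. The Python indexings floor_map[floor_number-1][j] are always in
-- range (floor_map has floor_number rows, each of length max_n); pyGetD's defaults are never used.
def resident_map (max_k : Int) (max_n : Int) : List (List Int) :=
  let floor : List Int :=
    (PySem.List.pyRange 1 (max_n + 1) 1).foldl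
      (fun fl num => fl ++ [PySem.Int.floordiv (num * (num + 1)) 2]) []
  let floor_map : List (List Int) := [floor]
  if max_k = 1 then floor_map
  else
    (PySem.List.pyRange 1 max_k 1).foldl
      (fun fm floor_number =>
        fm ++ [(PySem.List.pyRange 0 max_n 1).foldl
          (fun fl room_number =>
            fl ++ [(PySem.List.pyRange 0 (room_number + 1) 1).foldl
              (fun s j => s + PySem.List.pyGetD (PySem.List.pyGetD fm (floor_number - 1) []) j 0) 0])
          []])
      floor_map

-- ===== PORT B =====
-- Literal port of Source B: running prefix sums carried as (running total, row built so far).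
def resident_map_alt (max_k : Int) (max_n : Int) : List (List Int) :=
  let p : Int × List Int :=
    (PySem.List.pyRange 1 (max_n + 1) 1).foldl
      (fun (p : Int × List Int) num => (p.1 + num, p.2 ++ [p.1 + num])) (0, [])
  let row : List Int := p.2
  let st : List (List Int) × List Int :=
    (PySem.List.pyRange 1 max_k 1).foldl
      (fun (st : List (List Int) × List Int) _ =>
        let q : Int × List Int :=
          st.2.foldl (fun (q : Int × List Int) x => (q.1 + x, q.2 ++ [q.1 + x])) (0, [])
        (st.1 ++ [q.2], q.2))
      ([row], row)
  st.1

-- ===== PRECONDITION & SPEC =====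
def Spec_resident_map (max_k : Int) (max_n : Int) (out : List (List Int)) : Prop := out = resident_map_alt max_k max_n
instance (max_k : Int) (max_n : Int) (out : List (List Int)) : Decidable (Spec_resident_map max_k max_n out) := by unfold Spec_resident_map; infer_instance

-- ===== CLAIM (what is proved, stated in full; the proofs are below) =====
def Claim_equal_resident_map : Prop := ∀ (max_k : Int) (max_n : Int), Dom_resident_map max_k max_n → Spec_resident_map max_k max_n (resident_map max_k max_n)

-- ===== LEMMAS AND PROOFS =====

-- prefix-sum of a row: pvPfx r = [sum of r[0..0], sum of r[0..1], ...]
def pvPfx (r : List Int) : List Int := (List.range r.length).map (fun i => (r.take (i + 1)).sum)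

-- triangular number 1 + 2 + ... + m, as the sum B's first loop accumulates
def pvTri (m : Nat) : Int := ((List.range m).map (fun k : Nat => (1 : Int) + (k : Int))).sum

-- the first floor
def pvBase (max_n : Int) : List Int := (List.range max_n.toNat).map (fun i => pvTri (i + 1))

-- floor j (0-based), and the table of floors 0..m
def pvItrow (max_n : Int) : Nat → List Int
  | 0 => pvBase max_n
  | j + 1 => pvPfx (pvItrow max_n j)

def pvRows (max_n : Int) (m : Nat) : List (List Int) := (List.range (m + 1)).map (pvItrow max_n)

theorem length_pvPfx (r : List Int) : (pvPfx r).length = r.length := by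
  simp [pvPfx]

theorem length_pvBase (max_n : Int) : (pvBase max_n).length = max_n.toNat := by
  simp [pvBase]

theorem length_pvItrow (max_n : Int) (j : Nat) : (pvItrow max_n j).length = max_n.toNat := by
  induction j with
  | zero => exact length_pvBase max_n
  | succ j ih => simpa [pvItrow, length_pvPfx] using ih

theorem pvTri_succ (m : Nat) : pvTri (m + 1) = pvTri m + (1 + (m : Int)) := by
  simp [pvTri, List.range_succ]

theorem pvTri_two (m : Nat) : pvTri m * 2 = m * (m + 1) := by
  induction m with
  | zero => simp [pvTri]
  | succ m ih =>
    rw [pvTri_succ]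
    push_cast
    nlinarith [ih]

-- B's running-sum loop, characterised
theorem pvScan_eq (r : List Int) (c : Int) (acc : List Int) :
    (r.foldl (fun (q : Int × List Int) x => (q.1 + x, q.2 ++ [q.1 + x])) (c, acc)).2
      = acc ++ (List.range r.length).map (fun i => c + (r.take (i + 1)).sum) := by
  induction r generalizing c acc with
  | nil => simp
  | cons x r ih =>
    simp only [List.foldl_cons, ih, List.length_cons, List.range_succ_eq_map]
    simp [List.map_map, Function.comp, add_assoc, List.append_assoc]

theorem pvScan0 (r : List Int) :
    (r.foldl (fun (q : Int × List Int) x => (q.1 + x, q.2 ++ [q.1 + x])) ((0 : Int), ([] : List Int))).2 = pvPfx r := by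
  simp [pvScan_eq, pvPfx]

-- take as a map of getD, for the inner-sum characterisation
theorem pvTake_eq_map_getD (r : List Int) (m : Nat) (h : m ≤ r.length) :
    (List.range m).map (fun k => r.getD k 0) = r.take m := by
  induction m with
  | zero => simp
  | succ m ih =>
    rw [List.range_succ, List.map_append, ih (by omega), List.take_add_one]
    have h1 : r[m]? = some r[m] := List.getElem?_eq_getElem (by omega)
    simp [h1, List.getD]

-- A's innermost loop: summing rooms 0..i of row r
theorem pvInner_sum (r : List Int) (i : Nat) (h : i < r.length) :
    (PySem.List.pyRange 0 ((i : Int) + 1) 1).foldl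
        (fun s j => s + PySem.List.pyGetD r j 0) 0 = (r.take (i + 1)).sum := by
  rw [PySem.List.foldl_add, PySem.List.pyRange_one 0 ((i : Int) + 1)]
  simp only [zero_add, List.map_map]
  have h1 : ((i : Int) + 1 - 0).toNat = i + 1 := by omega
  rw [h1]
  have h2 : ∀ k ∈ List.range (i + 1),
      ((fun j => PySem.List.pyGetD r j 0) ∘ fun k : Nat => ((k : Int))) k = r.getD k 0 := by
    intro k hk
    simp [PySem.List.pyGetD_natCast]
  rw [List.map_congr_left h2, pvTake_eq_map_getD r (i + 1) (by omega)]

-- A's per-floor loop on a row r of length max_n.toNat builds pvPfx r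
theorem pvFloorA_eq (max_n : Int) (r : List Int) (hr : r.length = max_n.toNat) :
    (PySem.List.pyRange 0 max_n 1).foldl
        (fun fl room_number =>
          fl ++ [(PySem.List.pyRange 0 (room_number + 1) 1).foldl
            (fun s j => s + PySem.List.pyGetD r j 0) 0]) []
      = pvPfx r := by
  rw [PySem.List.foldl_append_singleton_eq_map, PySem.List.pyRange_one 0 max_n]
  simp only [List.nil_append, List.map_map]
  have h1 : (max_n - 0).toNat = r.length := by omega
  rw [h1]
  unfold pvPfx
  apply List.map_congr_left
  intro k hk
  rw [List.mem_range] at hk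
  simp only [Function.comp_apply, zero_add]
  exact pvInner_sum r k hk

-- A's first-floor loop builds pvBase max_n
theorem pvRowA_eq (max_n : Int) :
    (PySem.List.pyRange 1 (max_n + 1) 1).foldl
        (fun fl num => fl ++ [PySem.Int.floordiv (num * (num + 1)) 2]) [] = pvBase max_n := by
  rw [PySem.List.foldl_append_singleton_eq_map, PySem.List.pyRange_one 1 (max_n + 1)]
  simp only [List.nil_append, List.map_map]
  have h1 : (max_n + 1 - 1).toNat = max_n.toNat := by omega
  rw [h1]
  unfold pvBase
  apply List.map_congr_left
  intro k _
  simp only [Function.comp_apply]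
  have h2 : ((1 : Int) + k) * ((1 : Int) + k + 1) = pvTri (k + 1) * 2 := by
    rw [pvTri_two]; push_cast; ring
  rw [h2, PySem.Int.floordiv_eq_ediv_of_pos (by norm_num), Int.mul_ediv_cancel _ (by norm_num)]

-- B's first-floor loop builds pvBase max_n
theorem pvRowB_eq (max_n : Int) :
    ((PySem.List.pyRange 1 (max_n + 1) 1).foldl
        (fun (p : Int × List Int) num => (p.1 + num, p.2 ++ [p.1 + num])) (0, [])).2 = pvBase max_n := by
  rw [pvScan_eq, PySem.List.pyRange_one 1 (max_n + 1)]
  have h1 : (max_n + 1 - 1).toNat = max_n.toNat := by omega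
  rw [h1]
  simp only [List.nil_append, List.length_map, List.length_range]
  unfold pvBase
  apply List.map_congr_left
  intro i hi
  rw [List.mem_range] at hi
  rw [zero_add, ← List.map_take, List.take_range, min_eq_left (by omega)]
  rfl

theorem pvRows_getD (max_n : Int) (j : Nat) : (pvRows max_n j).getD j [] = pvItrow max_n j := by
  unfold pvRows
  rw [List.getD_eq_getElem?_getD, List.getElem?_map, List.getElem?_range (by omega)]
  rfl

theorem pvRows_succ (max_n : Int) (j : Nat) :
    pvRows max_n (j + 1) = pvRows max_n j ++ [pvItrow max_n (j + 1)] := by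
  unfold pvRows
  rw [List.range_succ, List.map_append]
  rfl

-- A's outer loop invariant
theorem pvA_aux (max_n : Int) (j : Nat) :
    (List.range j).foldl
        (fun fm (k : Nat) =>
          fm ++ [(PySem.List.pyRange 0 max_n 1).foldl
            (fun fl room_number =>
              fl ++ [(PySem.List.pyRange 0 (room_number + 1) 1).foldl
                (fun s jj => s + PySem.List.pyGetD (PySem.List.pyGetD fm ((1 + (k : Int)) - 1) []) jj 0) 0])
            []])
        [pvBase max_n] = pvRows max_n j := by
  induction j with
  | zero => simp [pvRows, pvItrow]
  | succ j ih =>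
    rw [List.range_succ, List.foldl_append, ih]
    simp only [List.foldl_cons, List.foldl_nil]
    have h1 : (1 + (j : Int)) - 1 = (j : Int) := by omega
    rw [h1, PySem.List.pyGetD_natCast, pvRows_getD]
    rw [pvFloorA_eq max_n _ (length_pvItrow max_n j)]
    rw [pvRows_succ]
    rfl

-- B's outer loop invariant
theorem pvB_aux (max_n : Int) (j : Nat) :
    (List.range j).foldl
        (fun (st : List (List Int) × List Int) (_ : Nat) =>
          (st.1 ++ [(st.2.foldl (fun (q : Int × List Int) x => (q.1 + x, q.2 ++ [q.1 + x])) (0, [])).2],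
           (st.2.foldl (fun (q : Int × List Int) x => (q.1 + x, q.2 ++ [q.1 + x])) (0, [])).2))
        ([pvBase max_n], pvBase max_n) = (pvRows max_n j, pvItrow max_n j) := by
  induction j with
  | zero => simp [pvRows, pvItrow]
  | succ j ih =>
    rw [List.range_succ, List.foldl_append, ih]
    simp only [List.foldl_cons, List.foldl_nil]
    rw [pvScan0, pvRows_succ]
    exact Prod.ext rfl rfl

theorem pvA_eq (max_k max_n : Int) : resident_map max_k max_n = pvRows max_n (max_k - 1).toNat := by
  simp only [resident_map]
  rw [pvRowA_eq]
  by_cases hk : max_k = 1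
  · simp [hk, pvRows, pvItrow]
  · simp only [hk, if_false]
    rw [PySem.List.pyRange_one 1 max_k, List.foldl_map]
    exact pvA_aux max_n (max_k - 1).toNat

theorem pvB_eq (max_k max_n : Int) : resident_map_alt max_k max_n = pvRows max_n (max_k - 1).toNat := by
  simp only [resident_map_alt]
  rw [pvRowB_eq, PySem.List.pyRange_one 1 max_k, List.foldl_map]
  rw [pvB_aux max_n (max_k - 1).toNat]

-- ===== VERDICT (by name: the statement is the Claim_ definition above) =====
theorem resident_map_spec : Claim_equal_resident_map := by
  intro max_k max_n _
  unfold Spec_resident_map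
  rw [pvA_eq, pvB_eq]
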